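-- pv_equiv track=rewrite | github.com/gayahovhann/MLpython | Python/matrix.py | ex546
-- ===== SOURCE A (Python) =====
-- def ex546(m_matrix):
--     k=0
--     for l in range(len(m_matrix[0])):
--         for i in range(len(m_matrix)):
--             for j in range(i+1, len(m_matrix)):
--                 if m_matrix[i][l]==m_matrix[j][l]:
--                     k += 1
--                     break
--     k = len(m_matrix)-k+1
--     return k
-- ===== SOURCE B (Python) =====
-- def ex546(m_matrix):
--     w = len(m_matrix[0])
--     seen = set()
--     for row in m_matrix:
--         for l in range(w):
--             seen.add((l, row[l]))
--     k = len(m_matrix) * w - len(seen)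
--     return len(m_matrix) - k + 1
-- ===== Notes on version B (the rewrite author's own statement) =====
-- stated objective: faster
-- what changed: Replaces the per-column triple-nested scan (for each row, scan all later rows for a duplicate) by a single flat pass over all cells building one global set of (column, value) pairs, then computes the duplicate count in closed form as total cells minus distinct pairs.
import Mathlib
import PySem

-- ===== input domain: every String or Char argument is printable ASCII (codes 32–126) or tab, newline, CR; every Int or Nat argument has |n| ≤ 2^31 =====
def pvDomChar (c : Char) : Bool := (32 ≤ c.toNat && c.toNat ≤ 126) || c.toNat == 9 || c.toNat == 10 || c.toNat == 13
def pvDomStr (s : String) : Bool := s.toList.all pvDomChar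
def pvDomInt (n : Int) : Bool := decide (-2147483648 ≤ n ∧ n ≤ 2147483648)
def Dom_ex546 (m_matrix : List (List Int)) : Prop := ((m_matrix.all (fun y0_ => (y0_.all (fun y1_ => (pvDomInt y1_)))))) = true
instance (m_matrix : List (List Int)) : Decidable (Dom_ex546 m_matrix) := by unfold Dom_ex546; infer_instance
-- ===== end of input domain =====

-- B replaces A's per-column triple-nested scan by one flat pass building a global set of
-- (column, value) pairs plus a closed-form reduction (duplicates = cells - distinct pairs).


-- ===== PORT A =====
def ex546 (m_matrix : List (List Int)) : Int :=
  let n := m_matrix.length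
  let k : Int :=
    (List.range (m_matrix.headD []).length).foldl (fun k l =>
      (List.range n).foldl (fun k i =>
        -- 'for j in range(i+1, n): if m[i][l]==m[j][l]: k += 1; break' — bump k once if any later row matches
        if (List.range' (i+1) (n - (i+1))).any
             (fun j => (m_matrix.getD i []).getD l 0 == (m_matrix.getD j []).getD l 0)
        then k + 1 else k) k) 0
  (n : Int) - k + 1

-- ===== PORT B =====
def ex546_alt (m_matrix : List (List Int)) : Int :=
  let w := (m_matrix.headD []).length
  let seen : PySem.Set (Nat × Int) :=
    m_matrix.foldl (fun s row =>
      (List.range w).foldl (fun s l => PySem.Set.add s (l, row.getD l 0)) s) PySem.Set.empty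
  let k : Int := (m_matrix.length : Int) * (w : Int) - (seen.length : Int)
  (m_matrix.length : Int) - k + 1

-- ===== PRECONDITION & SPEC =====
-- Pre_ excludes exactly the inputs where Python A raises IndexError: the empty matrix
-- (m_matrix[0]) and matrices with a row shorter than the first row (m_matrix[j][l]).
def Pre_ex546 (m_matrix : List (List Int)) : Prop :=
  m_matrix ≠ [] ∧ ∀ row ∈ m_matrix, (m_matrix.headD []).length ≤ row.length
instance (m_matrix : List (List Int)) : Decidable (Pre_ex546 m_matrix) := by unfold Pre_ex546; infer_instance
def pvWitness_ex546 : List (List Int) := [[1, 2], [1, 3], [4, 3]]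

def Spec_ex546 (m_matrix : List (List Int)) (out : Int) : Prop := out = ex546_alt m_matrix
instance (m_matrix : List (List Int)) (out : Int) : Decidable (Spec_ex546 m_matrix out) := by unfold Spec_ex546; infer_instance

-- ===== CLAIM (what is proved, stated in full; the proofs are below) =====
def Claim_equal_ex546 : Prop := ∀ (m_matrix : List (List Int)), Dom_ex546 m_matrix → Pre_ex546 m_matrix → Spec_ex546 m_matrix (ex546 m_matrix)

-- ===== LEMMAS AND PROOFS =====

-- the values of column l, in row order
def col (m : List (List Int)) (l : Nat) : List Int := m.map (fun row => row.getD l 0)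

-- all (column index, cell value) pairs in B's row-major visiting order
def pairsL (m : List (List Int)) (w : Nat) : List (Nat × Int) :=
  m.flatMap (fun row => (List.range w).map (fun l => (l, row.getD l 0)))

lemma mapGetD (v : List Int) : (List.range v.length).map (fun t => v.getD t 0) = v := by
  induction v with
  | nil => simp
  | cons a t ih =>
    simp [List.range_succ_eq_map, List.map_map]
    exact ih

lemma anyIdx (c : Int) (u : List Int) :
    (List.range u.length).any (fun t => c == u.getD t 0) = decide (c ∈ u) := by
  calc (List.range u.length).any (fun t => c == u.getD t 0)
      = ((List.range u.length).map (fun t => u.getD t 0)).any (fun x => c == x) := by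
        rw [List.any_map]; rfl
    _ = u.any (fun x => c == x) := by rw [mapGetD]
    _ = decide (c ∈ u) := by rw [List.any_beq]; simp

lemma anyTail (v : List Int) (i : Nat) (c : Int) :
    (List.range' (i+1) (v.length - (i+1))).any (fun j => c == v.getD j 0)
      = decide (c ∈ v.drop (i+1)) := by
  rw [List.range'_eq_map_range, List.any_map]
  have h : ((fun j => c == v.getD j 0) ∘ fun x => i + 1 + x)
      = (fun t => c == (v.drop (i+1)).getD t 0) := by
    funext t; simp [Function.comp, List.getD, List.getElem?_drop]
  rw [h]
  simpa [List.length_drop] using anyIdx c (v.drop (i+1))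

-- rows with a later duplicate = length - number of distinct values
lemma countDup (v : List Int) :
    (List.range v.length).countP (fun i => decide (v.getD i 0 ∈ v.drop (i+1)))
      = v.length - v.dedup.length := by
  induction v with
  | nil => simp
  | cons a t ih =>
    have hd : t.dedup.length ≤ t.length := t.dedup_sublist.length_le
    rw [List.length_cons, List.range_succ_eq_map, List.countP_cons, List.countP_map]
    have h0 : (List.range t.length).countP
          ((fun i => decide ((a::t).getD i 0 ∈ (a::t).drop (i+1))) ∘ Nat.succ)
        = (List.range t.length).countP (fun i => decide (t.getD i 0 ∈ t.drop (i+1))) := by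
      apply List.countP_congr
      intro i _; simp [Function.comp, List.getD]
    rw [h0, ih]
    by_cases hm : a ∈ t
    · simp [hm, List.dedup_cons_of_mem hm]
      omega
    · simp [hm, List.dedup_cons_of_notMem hm]

lemma cell_eq (m : List (List Int)) (l j : Nat) (hj : j < m.length) :
    (m.getD j []).getD l 0 = (col m l).getD j 0 := by
  simp [col, List.getD, List.getElem?_eq_getElem hj]

lemma countCol (m : List (List Int)) (l : Nat) :
    (List.range m.length).countP (fun i =>
        (List.range' (i+1) (m.length - (i+1))).any
          (fun j => (m.getD i []).getD l 0 == (m.getD j []).getD l 0))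
      = (col m l).length - (col m l).dedup.length := by
  have hv : (col m l).length = m.length := by simp [col]
  rw [show (List.range m.length) = (List.range (col m l).length) by rw [hv]]
  rw [← countDup (col m l)]
  apply List.countP_congr
  intro i hi
  rw [List.mem_range] at hi
  have hins : ∀ j ∈ List.range' (i+1) ((col m l).length - (i+1)),
      ((m.getD i []).getD l 0 == (m.getD j []).getD l 0)
        = ((col m l).getD i 0 == (col m l).getD j 0) := by
    intro j hj
    rw [List.mem_range'_1] at hj
    rw [cell_eq m l i (by omega), cell_eq m l j (by omega)]
  have hb := PySem.List.any_congr_mem hins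
  rw [anyTail (col m l) i _] at hb
  rw [hv] at hb
  rw [hb]

lemma exA (m : List (List Int)) :
    ex546 m = (m.length : Int)
      - ((List.range (m.headD []).length).map
          (fun l => (((col m l).length - (col m l).dedup.length : ℕ) : ℤ))).sum + 1 := by
  unfold ex546
  simp only
  congr 2
  rw [PySem.List.foldl_congr_mem (g := fun (k : Int) l =>
        k + (((col m l).length - (col m l).dedup.length : ℕ) : ℤ))]
  · rw [PySem.List.foldl_add]; simp
  · intro acc l _
    rw [PySem.List.foldl_if_add_one, countCol m l]

lemma seen_eq (m : List (List Int)) (w : Nat) :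
    m.foldl (fun s row =>
      (List.range w).foldl (fun s l => PySem.Set.add s (l, row.getD l 0)) s) PySem.Set.empty
    = PySem.Set.ofList (pairsL m w) := by
  rw [PySem.Set.ofList_eq_foldl, pairsL, List.foldl_flatMap]
  apply PySem.List.foldl_congr_mem
  intro acc row _
  rw [List.foldl_map]

lemma len_seen (m : List (List Int)) (w : Nat) :
    (PySem.Set.ofList (pairsL m w)).length = (pairsL m w).toFinset.card := by
  have nd : (PySem.Set.ofList (pairsL m w)).Nodup := PySem.Set.nodup_ofList _
  have hf : (PySem.Set.ofList (pairsL m w)).toFinset = (pairsL m w).toFinset := by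
    ext x; simp [PySem.Set.mem_ofList]
  rw [← hf, List.toFinset_card_of_nodup nd]

-- distinct (column, value) pairs split by column: first components differ across columns
lemma cardL (m : List (List Int)) (w : Nat) :
    (pairsL m w).toFinset.card = ∑ l ∈ Finset.range w, (col m l).toFinset.card := by
  have hF : (pairsL m w).toFinset
      = (Finset.range w).biUnion (fun l => ((col m l).toFinset).image (fun c => (l, c))) := by
    ext x
    rcases x with ⟨l0, c⟩
    simp [pairsL, col, List.mem_flatMap, Finset.mem_biUnion, Prod.ext_iff]
    aesop
  rw [hF, Finset.card_biUnion]
  · apply Finset.sum_congr rfl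
    intro l _
    exact Finset.card_image_of_injective _ (fun a b h => congrArg Prod.snd h)
  · intro a _ b _ hab
    simp [Finset.disjoint_left]
    intro p hp c hc h1 h2
    exact hab h1.symm

lemma exB (m : List (List Int)) :
    ex546_alt m = (m.length : Int)
      - ((m.length : Int) * ((m.headD []).length : Int)
          - (∑ l ∈ Finset.range (m.headD []).length, ((col m l).toFinset.card : ℤ))) + 1 := by
  unfold ex546_alt
  simp only
  rw [seen_eq, len_seen, cardL]
  push_cast
  ring

-- ===== VERDICT (by name: the statement is the Claim_ definition above) =====
theorem ex546_spec : Claim_equal_ex546 := by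
  intro m _ _
  unfold Spec_ex546
  rw [exA m, exB m]
  have hsum : ((List.range (m.headD []).length).map
        (fun l => (((col m l).length - (col m l).dedup.length : ℕ) : ℤ))).sum
      = ∑ l ∈ Finset.range (m.headD []).length,
          (((col m l).length - (col m l).dedup.length : ℕ) : ℤ) := rfl
  rw [hsum]
  have hcongr : ∀ l ∈ Finset.range (m.headD []).length,
      (((col m l).length - (col m l).dedup.length : ℕ) : ℤ)
        = (m.length : ℤ) - ((col m l).toFinset.card : ℤ) := by
    intro l _
    have hlen : (col m l).length = m.length := by simp [col]
    have hc : (col m l).toFinset.card = (col m l).dedup.length := List.card_toFinset _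
    have hle : (col m l).dedup.length ≤ (col m l).length := (col m l).dedup_sublist.length_le
    rw [hc, ← hlen]
    omega
  rw [Finset.sum_congr rfl hcongr, Finset.sum_sub_distrib]
  simp [Finset.sum_const, Finset.card_range, mul_comm]
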